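-- pv_equiv track=rewrite | github.com/nicole-drinda-max/robust-telemetry-codec- | robust_telemetry_codec.py | fib_encode_int
-- ===== SOURCE A (Python) =====
-- from typing import List, Tuple, Optional
--
-- def _fib_sequence_upto(n: int) -> List[int]:
--     """Fibonacci numbers for coding: 1,2,3,5,8,..."""
--     fibs = [1, 2]
--     while fibs[-1] <= n:
--         fibs.append(fibs[-1] + fibs[-2])
--     return fibs
--
-- def fib_encode_int(x: int) -> str:
--     """
--     Fibonacci coding for x >= 1 (positive integer).
--     Produces a bitstring that ends with '11' (via terminator rule).
--     """
--     if x < 1: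
--         raise ValueError("fib_encode_int expects x >= 1")
--
--     fibs = _fib_sequence_upto(x)
--     remaining = x
--
--     bits = []
--     used_prev = False
--     for f in reversed(fibs[:-1]):  # skip last which is > x
--         if f <= remaining and not used_prev:
--             bits.append("1")
--             remaining -= f
--             used_prev = True
--         else:
--             bits.append("0")
--             used_prev = False
--
--     s = "".join(bits).lstrip("0")
--     if not s:
--         s = "0"
--
--     return s + "1"
-- ===== SOURCE B (Python) =====
-- def fib_encode_int(x: int) -> str:
--     """
--     Fibonacci coding for x >= 1: greedy collection of used Fibonacci indices,
--     then a separate construction pass from the highest used index down.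
--     """
--     if x < 1:
--         raise ValueError("fib_encode_int expects x >= 1")
--
--     fibs = [1, 2]
--     while fibs[-1] <= x:
--         fibs.append(fibs[-1] + fibs[-2])
--
--     # pass 1: greedy -- collect the indices of the Fibonacci numbers used
--     used = []
--     remaining = x
--     for i, f in reversed(list(enumerate(fibs[:-1]))):
--         if f <= remaining:
--             used.append(i)
--             remaining -= f
--
--     # pass 2: build the bitstring from the highest used index down to 0
--     chars = ["1" if i in used else "0" for i in reversed(range(used[0] + 1))]
--     return "".join(chars) + "1"
-- ===== Notes on version B (the rewrite author's own statement) =====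
-- stated objective: alternative
-- what changed: A's single strip-based loop carrying a used_prev flag is replaced by a greedy pass that collects the used Fibonacci indices and a separate construction pass that paints the bitstring from the highest used index down (the redundant used_prev flag and the lstrip fallback disappear).
import Mathlib
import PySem

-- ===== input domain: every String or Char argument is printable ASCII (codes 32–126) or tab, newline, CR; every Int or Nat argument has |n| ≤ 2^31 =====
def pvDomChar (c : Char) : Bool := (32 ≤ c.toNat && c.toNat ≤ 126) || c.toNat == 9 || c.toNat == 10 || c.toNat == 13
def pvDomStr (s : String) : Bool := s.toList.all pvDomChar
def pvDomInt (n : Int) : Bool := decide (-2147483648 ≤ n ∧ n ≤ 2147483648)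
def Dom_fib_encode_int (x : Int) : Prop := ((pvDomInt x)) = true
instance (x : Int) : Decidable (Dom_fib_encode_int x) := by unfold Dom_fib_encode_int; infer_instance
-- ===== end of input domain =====

-- B replaces A's single strip-based loop (with its redundant used_prev flag) by a greedy
-- index-collection pass followed by a separate bitstring-construction pass (objective: alternative).


-- ===== PORT A =====
-- _fib_sequence_upto's while loop, carrying a = fibs[-2], b = fibs[-1] alongside the list;
-- fuel only bounds the iterations (b grows by at least 1 per step, so x.toNat + 1 suffices).
def pvFibLoop (n : Int) : Int → Int → List Int → Nat → List Int
  | _, _, acc, 0 => acc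
  | a, b, acc, fuel + 1 => if b ≤ n then pvFibLoop n b (a + b) (acc ++ [a + b]) fuel else acc

def pvFibsUpto (n : Int) : List Int := pvFibLoop n 1 2 [1, 2] (n.toNat + 1)

-- the for-loop over reversed(fibs[:-1]): bits is a list of single chars ("1"/"0"), modeled as List Char
def pvBitsA : List Int → Int → Bool → List Char
  | [], _, _ => []
  | f :: rest, remaining, used_prev =>
    if f ≤ remaining ∧ used_prev = false then '1' :: pvBitsA rest (remaining - f) true
    else '0' :: pvBitsA rest remaining false

def fib_encode_int (x : Int) : String :=
  if x < 1 then ""  -- Python raises ValueError here; excluded by Pre_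
  else
    let fibs := pvFibsUpto x
    let bits := pvBitsA fibs.dropLast.reverse x false
    -- "".join(bits).lstrip("0"): drops exactly the leading '0' chars
    let s := bits.dropWhile (· == '0')
    let s := if s.isEmpty then ['0'] else s
    String.ofList (s ++ ['1'])

-- ===== PORT B =====
-- pass 1 of Source B: the for-loop over reversed(list(enumerate(fibs[:-1]))) collecting used indices
def pvUsedB : List (Int × Int) → Int → List Int → List Int
  | [], _, used => used
  | (i, f) :: rest, remaining, used =>
    if f ≤ remaining then pvUsedB rest (remaining - f) (used ++ [i])
    else pvUsedB rest remaining used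

def fib_encode_int_alt (x : Int) : String :=
  if x < 1 then ""  -- Python raises ValueError here; excluded by Pre_
  else
    let fibs := pvFibsUpto x
    let used := pvUsedB (PySem.List.enumerate fibs.dropLast 0).reverse x []
    -- used[0]: for x ≥ 1 the topmost Fibonacci number is always used, so used ≠ [] and
    -- this indexing never raises; pyGetD is exact here
    let m := PySem.List.pyGetD used 0 0
    -- pass 2: ["1" if i in used else "0" for i in reversed(range(used[0] + 1))]
    let chars := ((PySem.List.pyRange 0 (m + 1) 1).reverse).map
      (fun i => if used.contains i then '1' else '0')
    String.ofList (chars ++ ['1'])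

-- ===== PRECONDITION & SPEC =====
-- Pre_ excludes exactly x < 1, where the Python A raises ValueError.
def Pre_fib_encode_int (x : Int) : Prop := 1 ≤ x
instance (x : Int) : Decidable (Pre_fib_encode_int x) := by unfold Pre_fib_encode_int; infer_instance
def pvWitness_fib_encode_int : Int := (11)

def Spec_fib_encode_int (x : Int) (out : String) : Prop := out = fib_encode_int_alt x
instance (x : Int) (out : String) : Decidable (Spec_fib_encode_int x out) := by unfold Spec_fib_encode_int; infer_instance

-- ===== CLAIM (what is proved, stated in full; the proofs are below) =====
def Claim_equal_fib_encode_int : Prop := ∀ (x : Int), Dom_fib_encode_int x → Pre_fib_encode_int x → Spec_fib_encode_int x (fib_encode_int x)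

-- ===== LEMMAS AND PROOFS =====

-- the canonical greedy flag sequence both loops follow
def pvGreedy : List Int → Int → List Bool
  | [], _ => []
  | f :: rest, rem => if f ≤ rem then true :: pvGreedy rest (rem - f) else false :: pvGreedy rest rem

-- descending Fibonacci chain property of reversed(fibs[:-1]): each entry is the sum of the two below it
def pvChain : List Int → Prop
  | [] => True
  | [f] => f = 1
  | g :: f :: rest => g = f + rest.headD 1 ∧ pvChain (f :: rest)

-- strict bound the remainder satisfies on entry to the loop
def pvBnd : List Int → Int
  | [] => 1
  | f :: rest => f + rest.headD 1

-- greedy selection of indices, the accumulator-free core of pvUsedB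
def pvSel : List (Int × Int) → Int → List Int
  | [], _ => []
  | (i, f) :: rest, rem => if f ≤ rem then i :: pvSel rest (rem - f) else pvSel rest rem

-- pairs with descending indices n, n-1, …
def pvZipDesc : List Int → Int → List (Int × Int)
  | [], _ => []
  | a :: rest, n => (n, a) :: pvZipDesc rest (n - 1)

theorem pvChain_pos : ∀ (l : List Int), pvChain l → ∀ f ∈ l, 1 ≤ f := by
  intro l
  induction l with
  | nil => intro _ f hf; exact absurd hf (List.not_mem_nil)
  | cons g t ih =>
    intro hc f hf
    cases t with
    | nil =>
      have hg : g = 1 := hc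
      have : f = g := List.mem_singleton.mp hf
      omega
    | cons e rest =>
      obtain ⟨hg, hc'⟩ := hc
      rcases List.mem_cons.mp hf with hf | hf
      · have h1 : (1:Int) ≤ e := ih hc' e (List.mem_cons_self)
        have h2 : (1:Int) ≤ rest.headD 1 := by
          cases rest with
          | nil => norm_num
          | cons r rs => exact ih hc' r (List.mem_cons_of_mem _ (List.mem_cons_self))
        omega
      · exact ih hc' f hf

theorem pvBitsA_eq_greedy : ∀ (l : List Int) (rem : Int) (up : Bool), pvChain l → rem < pvBnd l →
    (up = true → rem < l.headD 1) →
    pvBitsA l rem up = (pvGreedy l rem).map (fun b => if b then '1' else '0') := by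
  intro l
  induction l with
  | nil => intro rem up _ _ _; simp [pvBitsA, pvGreedy]
  | cons f rest ih =>
    intro rem up hc hb hup
    have hbnd : rem < f + rest.headD 1 := hb
    have hcrest : pvChain rest := by
      cases rest with
      | nil => trivial
      | cons e rs => exact hc.2
    have hbndrest : ∀ r : Int, r < f → r < pvBnd rest := by
      intro r hr
      cases rest with
      | nil =>
        have hf1 : f = 1 := hc
        show r < 1
        omega
      | cons e rs =>
        have hg : f = e + rs.headD 1 := hc.1
        show r < e + rs.headD 1
        omega
    cases up with
    | true =>
      have hlt : rem < f := hup rfl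
      simp only [pvBitsA, pvGreedy]
      rw [if_neg (by simp : ¬((f ≤ rem) ∧ (true = false))), if_neg (by omega : ¬ f ≤ rem)]
      rw [List.map_cons]
      refine congrArg₂ _ (by simp) ?_
      exact ih rem false hcrest (hbndrest rem hlt) (by simp)
    | false =>
      by_cases hle : f ≤ rem
      · have hrem' : rem - f < rest.headD 1 := by omega
        have hb2 : rem - f < pvBnd rest := by
          cases rest with
          | nil =>
            show rem - f < 1
            simpa using hrem'
          | cons e rs =>
            have h1 : (1:Int) ≤ rs.headD 1 := by
              cases rs with
              | nil => norm_num
              | cons r rrs =>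
                exact pvChain_pos _ hcrest r (List.mem_cons_of_mem _ (List.mem_cons_self))
            have h2 : rem - f < e := hrem'
            show rem - f < e + rs.headD 1
            omega
        simp only [pvBitsA, pvGreedy]
        rw [if_pos (⟨hle, trivial⟩ : (f ≤ rem) ∧ True), if_pos hle]
        rw [List.map_cons]
        refine congrArg₂ _ (by simp) ?_
        exact ih (rem - f) true hcrest hb2 (fun _ => hrem')
      · simp only [pvBitsA, pvGreedy]
        rw [if_neg (by simp [hle] : ¬((f ≤ rem) ∧ True)), if_neg hle]
        rw [List.map_cons]
        refine congrArg₂ _ (by simp) ?_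
        exact ih rem false hcrest (hbndrest rem (by omega)) (by simp)

theorem pvUsedB_eq_sel : ∀ (pairs : List (Int × Int)) (rem : Int) (acc : List Int),
    pvUsedB pairs rem acc = acc ++ pvSel pairs rem := by
  intro pairs
  induction pairs with
  | nil => intro rem acc; simp [pvUsedB, pvSel]
  | cons p rest ih =>
    intro rem acc
    obtain ⟨i, f⟩ := p
    by_cases h : f ≤ rem
    · simp [pvUsedB, pvSel, h, ih]
    · simp [pvUsedB, pvSel, h, ih]

theorem pvZipDesc_append : ∀ (u : List Int) (xv : Int) (n : Int),
    pvZipDesc (u ++ [xv]) n = pvZipDesc u n ++ [(n - u.length, xv)] := by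
  intro u
  induction u with
  | nil => intro xv n; simp [pvZipDesc]
  | cons a rest ih =>
    intro xv n
    simp only [List.cons_append, pvZipDesc, ih, List.length_cons]
    congr 3
    push_cast
    ring

theorem pvEnumRev : ∀ (l : List Int) (s : Int),
    (PySem.List.enumerate l s).reverse = pvZipDesc l.reverse (s + l.length - 1) := by
  intro l
  induction l with
  | nil => intro s; simp [PySem.List.enumerate_nil, pvZipDesc]
  | cons a rest ih =>
    intro s
    rw [PySem.List.enumerate_cons, List.reverse_cons, ih (s + 1), List.reverse_cons,
      pvZipDesc_append]
    congr 1
    · congr 1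
      simp only [List.length_cons]
      push_cast
      ring
    · congr 2
      simp only [List.length_reverse, List.length_cons]
      push_cast
      ring

theorem pvSel_bound : ∀ (l : List Int) (n rem i : Int), i ∈ pvSel (pvZipDesc l n) rem → i ≤ n := by
  intro l
  induction l with
  | nil => intro n rem i h; simp [pvZipDesc, pvSel] at h
  | cons f rest ih =>
    intro n rem i h
    simp only [pvZipDesc, pvSel] at h
    by_cases hle : f ≤ rem
    · rw [if_pos hle] at h
      rcases List.mem_cons.mp h with h | h
      · omega
      · have := ih (n - 1) (rem - f) i h; omega
    · rw [if_neg hle] at h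
      have := ih (n - 1) rem i h; omega

theorem pvPaint : ∀ (l : List Int) (n rem : Int), n = (l.length : Int) - 1 →
    ((PySem.List.pyRange 0 (n + 1) 1).reverse).map
      (fun i => if (pvSel (pvZipDesc l n) rem).contains i then '1' else '0')
    = (pvGreedy l rem).map (fun b => if b then '1' else '0') := by
  intro l
  induction l with
  | nil =>
    intro n rem hn
    simp at hn
    subst hn
    rw [PySem.List.pyRange_one_eq_nil (by omega)]
    simp [pvGreedy]
  | cons f rest ih =>
    intro n rem hn
    have hn0 : 0 ≤ n := by simp at hn; omega
    rw [PySem.List.pyRange_one_succ_right (by omega)]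
    simp only [List.reverse_append, List.reverse_cons, List.reverse_nil, List.nil_append,
      List.singleton_append, List.map_cons]
    by_cases hle : f ≤ rem
    · have hsel : pvSel (pvZipDesc (f :: rest) n) rem
          = n :: pvSel (pvZipDesc rest (n - 1)) (rem - f) := by
        simp only [pvZipDesc, pvSel, if_pos hle]
      rw [hsel]
      have hhead : ((n :: pvSel (pvZipDesc rest (n - 1)) (rem - f)).contains n) = true := by
        simp
      rw [hhead]
      have htail : ((PySem.List.pyRange 0 n 1).reverse).map
          (fun i => if (n :: pvSel (pvZipDesc rest (n - 1)) (rem - f)).contains i then '1' else '0')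
          = ((PySem.List.pyRange 0 n 1).reverse).map
          (fun i => if (pvSel (pvZipDesc rest (n - 1)) (rem - f)).contains i then '1' else '0') := by
        apply List.map_congr_left
        intro i hi
        have hi' : i ∈ PySem.List.pyRange 0 n 1 := List.mem_reverse.mp hi
        have hib : 0 ≤ i ∧ i < n := (PySem.List.mem_pyRange_one).mp hi'
        have hne : i ≠ n := by omega
        simp [hne]
      rw [htail]
      have hrec := ih (n - 1) (rem - f) (by simp at hn ⊢; omega)
      rw [show n - 1 + 1 = n by ring] at hrec
      rw [hrec]
      simp [pvGreedy, hle]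
    · have hsel : pvSel (pvZipDesc (f :: rest) n) rem
          = pvSel (pvZipDesc rest (n - 1)) rem := by
        simp only [pvZipDesc, pvSel, if_neg hle]
      rw [hsel]
      have hhead : ((pvSel (pvZipDesc rest (n - 1)) rem).contains n) = false := by
        by_contra hcon
        have hmem : n ∈ pvSel (pvZipDesc rest (n - 1)) rem := by
          simpa using (Bool.not_eq_false _).mp hcon
        have := pvSel_bound rest (n - 1) rem n hmem
        omega
      rw [hhead]
      have hrec := ih (n - 1) rem (by simp at hn ⊢; omega)
      rw [show n - 1 + 1 = n by ring] at hrec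
      rw [hrec]
      simp [pvGreedy, hle]

-- structural facts about the generated Fibonacci list
theorem pvFibLoop_spec : ∀ (fuel : Nat) (x a b : Int) (rest : List Int),
    1 ≤ a → a < b → a ≤ x → (x + 1 - b).toNat ≤ fuel → pvChain (b :: a :: rest) →
    ∃ b' a' rest', pvFibLoop x a b (b :: a :: rest).reverse fuel = (b' :: a' :: rest').reverse ∧
      pvChain (b' :: a' :: rest') ∧ x < b' ∧ a' ≤ x ∧ 1 ≤ a' := by
  intro fuel
  induction fuel with
  | zero =>
    intro x a b rest ha hab hax hfuel hc
    exact ⟨b, a, rest, rfl, hc, by omega, hax, ha⟩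
  | succ fuel ih =>
    intro x a b rest ha hab hax hfuel hc
    by_cases hbx : b ≤ x
    · have hrec := ih x b (a + b) (a :: rest) (by omega) (by omega) hbx (by omega)
        (⟨by simp; ring, hc⟩)
      obtain ⟨b', a', rest', heq, hc', hxb', hax', ha'⟩ := hrec
      refine ⟨b', a', rest', ?_, hc', hxb', hax', ha'⟩
      simp only [pvFibLoop, if_pos hbx]
      rw [← heq]
      congr 1
      simp
    · exact ⟨b, a, rest, by simp [pvFibLoop, hbx], hc, by omega, hax, ha⟩

theorem pvFibsUpto_spec : ∀ (x : Int), 1 ≤ x →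
    ∃ b' a' rest', pvFibsUpto x = (b' :: a' :: rest').reverse ∧
      pvChain (b' :: a' :: rest') ∧ x < b' ∧ a' ≤ x ∧ 1 ≤ a' := by
  intro x hx
  have := pvFibLoop_spec (x.toNat + 1) x 1 2 [] (by omega) (by omega) hx (by omega)
    (⟨by simp, rfl⟩)
  simpa [pvFibsUpto] using this

theorem pvGreedy_head : ∀ (f : Int) (rest : List Int) (rem : Int), f ≤ rem →
    pvGreedy (f :: rest) rem = true :: pvGreedy rest (rem - f) := by
  intro f rest rem h
  simp [pvGreedy, h]

-- ===== VERDICT (by name: the statement is the Claim_ definition above) =====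
theorem fib_encode_int_spec : Claim_equal_fib_encode_int := by
  intro x _ hpre
  have hx : (1:Int) ≤ x := hpre
  have hx1 : ¬ (x < 1) := by omega
  unfold Spec_fib_encode_int fib_encode_int fib_encode_int_alt
  rw [if_neg hx1, if_neg hx1]
  obtain ⟨b', a', rest', hF, hc, hxb, hax, ha⟩ := pvFibsUpto_spec x hx
  have hfv : (pvFibsUpto x).dropLast.reverse = a' :: rest' := by
    rw [hF, List.dropLast_reverse, List.reverse_reverse]
    rfl
  have hchain' : pvChain (a' :: rest') := hc.2
  have hbprime : b' = a' + rest'.headD 1 := hc.1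
  -- A side: the loop's bits are the greedy flags, starting with '1'
  have hbits : pvBitsA (a' :: rest') x false
      = (pvGreedy (a' :: rest') x).map (fun b => if b then '1' else '0') := by
    refine pvBitsA_eq_greedy _ x false hchain' ?_ (by simp)
    show x < a' + rest'.headD 1
    omega
  have hflag : pvGreedy (a' :: rest') x = true :: pvGreedy rest' (x - a') :=
    pvGreedy_head a' rest' x hax
  have hbits1 : pvBitsA ((pvFibsUpto x).dropLast.reverse) x false
      = '1' :: (pvGreedy rest' (x - a')).map (fun b => if b then '1' else '0') := by
    rw [hfv, hbits, hflag, List.map_cons]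
    simp
  -- B side
  have henum : (PySem.List.enumerate (pvFibsUpto x).dropLast 0).reverse
      = pvZipDesc (a' :: rest') (rest'.length : Int) := by
    have hlen := congrArg List.length hfv
    simp only [List.length_reverse, List.length_cons] at hlen
    rw [pvEnumRev, hfv]
    congr 1
    omega
  have hused : pvUsedB (pvZipDesc (a' :: rest') (rest'.length : Int)) x []
      = pvSel (pvZipDesc (a' :: rest') (rest'.length : Int)) x := by
    rw [pvUsedB_eq_sel]
    simp
  have hselc : pvSel (pvZipDesc (a' :: rest') (rest'.length : Int)) x
      = (rest'.length : Int) :: pvSel (pvZipDesc rest' ((rest'.length : Int) - 1)) (x - a') := by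
    simp only [pvZipDesc, pvSel, if_pos hax]
  have hm : PySem.List.pyGetD (pvSel (pvZipDesc (a' :: rest') (rest'.length : Int)) x) 0 0
      = (rest'.length : Int) := by
    rw [hselc]
    simp [pysem]
  have hpaint := pvPaint (a' :: rest') (rest'.length : Int) x
    (by push_cast [List.length_cons]; ring)
  simp only [hbits1, henum, hused, hm]
  rw [hpaint, hflag, List.map_cons]
  simp
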